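-- pv_equiv track=rewrite | github.com/ericberlow/creative-diversity | prepare_data.py | clean_biorhythm
-- ===== SOURCE A (Python) =====
-- def clean_biorhythm(x):
--     # convert biorhythm tags into just "Early Bird" vs "Hight Owl" extremes
--     taglist = str(x).split('|')
--     taglist = [tag.strip(' ') for tag in taglist] # strip empty spaces for each item in each list
--     bio_tags = [] # initialize new list of tags
--     for tag in taglist:
--         if tag in ["Pre Dawn", "Morning"]:
--             bio_tags.append("Early Bird")
--         if tag in ["Evening", "After Midnight"]:
--             bio_tags.append("Night Owl")
--     bio_tags = list(set(bio_tags)) # remove dupes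
--     n_tags = len(bio_tags)
--     if n_tags == 2:
--         bio_tags = [] # assume that if they list all, then no strong biorhythm
--     return  "|".join(bio_tags)
-- ===== SOURCE B (Python) =====
-- def clean_biorhythm(x):
--     # flag-based: the output is always one of "", "Early Bird", "Night Owl"
--     tags = [t.strip(' ') for t in str(x).split('|')]
--     early = any(t in ("Pre Dawn", "Morning") for t in tags)
--     owl = any(t in ("Evening", "After Midnight") for t in tags)
--     if early and owl:
--         return ""
--     if early:
--         return "Early Bird"
--     if owl:
--         return "Night Owl"
--     return ""
-- ===== Notes on version B (the rewrite author's own statement) =====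
-- stated objective: simpler
-- what changed: Replaces the build-list/set-dedup/length-check/join pipeline with two any() flags over the stripped tags and a direct four-way branch returning a fixed string.
import Mathlib
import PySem

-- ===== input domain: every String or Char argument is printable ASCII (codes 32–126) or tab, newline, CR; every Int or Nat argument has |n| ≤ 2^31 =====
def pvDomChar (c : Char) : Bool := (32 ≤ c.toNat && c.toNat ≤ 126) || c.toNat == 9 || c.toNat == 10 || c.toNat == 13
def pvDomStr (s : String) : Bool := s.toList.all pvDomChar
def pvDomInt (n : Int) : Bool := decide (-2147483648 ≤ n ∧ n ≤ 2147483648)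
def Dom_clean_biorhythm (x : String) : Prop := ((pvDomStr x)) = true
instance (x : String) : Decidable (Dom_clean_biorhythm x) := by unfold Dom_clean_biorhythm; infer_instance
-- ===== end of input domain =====

-- B replaces A's build-list / set-dedup / length-check / join pipeline with two any-flags
-- and a direct four-way branch (objective: simpler); same return value everywhere.

-- ===== PORT A =====
-- body of A's for-loop: two independent 'if tag in [...]' appends
def pvTagStep (acc : List String) (tag : String) : List String :=
  let acc1 := if tag = "Pre Dawn" ∨ tag = "Morning" then acc ++ ["Early Bird"] else acc
  if tag = "Evening" ∨ tag = "After Midnight" then acc1 ++ ["Night Owl"] else acc1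

def clean_biorhythm (x : String) : String :=
  let taglist := (PySem.Str.split? x "|").getD []  -- sep is the nonempty literal "|", so split? is always some
  let taglist := taglist.map (fun t => PySem.Str.stripChars t " ")
  let bio_tags := taglist.foldl pvTagStep []
  -- list(set(bio_tags)): first-insertion order; the only order-sensitive consumer (join)
  -- ever sees at most one element, so this is exact
  let bio_tags2 : List String := PySem.Set.ofList bio_tags
  let n_tags := bio_tags2.length
  let bio_tags3 := if n_tags = 2 then ([] : List String) else bio_tags2
  PySem.Str.join "|" bio_tags3

-- ===== PORT B =====
def clean_biorhythm_alt (x : String) : String :=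
  let tags := ((PySem.Str.split? x "|").getD []).map (fun t => PySem.Str.stripChars t " ")
  let early := tags.any (fun t => t == "Pre Dawn" || t == "Morning")
  let owl := tags.any (fun t => t == "Evening" || t == "After Midnight")
  if early && owl then ""
  else if early then "Early Bird"
  else if owl then "Night Owl"
  else ""

-- ===== PRECONDITION & SPEC =====
def Spec_clean_biorhythm (x : String) (out : String) : Prop := out = clean_biorhythm_alt x
instance (x : String) (out : String) : Decidable (Spec_clean_biorhythm x out) := by unfold Spec_clean_biorhythm; infer_instance

-- ===== CLAIM (what is proved, stated in full; the proofs are below) =====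
def Claim_equal_clean_biorhythm : Prop := ∀ (x : String), Dom_clean_biorhythm x → Spec_clean_biorhythm x (clean_biorhythm x)

-- ===== LEMMAS AND PROOFS =====

-- tag contribution of one element; the fold is acc ++ flatMap
def pvTagF (tag : String) : List String :=
  (if tag = "Pre Dawn" ∨ tag = "Morning" then ["Early Bird"] else []) ++
  (if tag = "Evening" ∨ tag = "After Midnight" then ["Night Owl"] else [])

theorem pvFoldl_eq_flatMap (ts : List String) (acc : List String) :
    ts.foldl pvTagStep acc = acc ++ ts.flatMap pvTagF := by
  induction ts generalizing acc with
  | nil => simp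
  | cons t ts ih =>
    simp only [List.foldl_cons, List.flatMap_cons, ih]
    simp [pvTagStep, pvTagF]
    split_ifs <;> simp

theorem pvMem_EB (ts : List String) :
    ("Early Bird" ∈ ts.flatMap pvTagF) ↔ ts.any (fun t => t == "Pre Dawn" || t == "Morning") = true := by
  simp [List.mem_flatMap, pvTagF, List.any_eq_true]

theorem pvMem_NO (ts : List String) :
    ("Night Owl" ∈ ts.flatMap pvTagF) ↔ ts.any (fun t => t == "Evening" || t == "After Midnight") = true := by
  simp [List.mem_flatMap, pvTagF, List.any_eq_true]

theorem pvMem_sub (ts : List String) (y : String) (hy : y ∈ ts.flatMap pvTagF) :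
    y = "Early Bird" ∨ y = "Night Owl" := by
  simp [List.mem_flatMap, pvTagF] at hy
  obtain ⟨t, _, hmem⟩ := hy
  tauto

-- a Nodup list whose members are exactly {a} is [a]
theorem pvNodup_singleton {α : Type} (l : List α) (a : α) (hn : l.Nodup)
    (h : ∀ y, y ∈ l ↔ y = a) : l = [a] := by
  have := List.perm_ext_iff_of_nodup hn (List.nodup_singleton a)
  have hp : l.Perm [a] := this.mpr (by simpa using h)
  rcases (List.perm_singleton.mp hp) with h'
  exact h'

theorem pvNodup_pair {α : Type} (l : List α) (a b : α) (hn : l.Nodup) (hab : a ≠ b)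
    (h : ∀ y, y ∈ l ↔ (y = a ∨ y = b)) : l.length = 2 := by
  have := List.perm_ext_iff_of_nodup hn (by simp [List.nodup_cons, hab] : ([a, b] : List α).Nodup)
  have hp : l.Perm [a, b] := this.mpr (by simpa using h)
  simpa using hp.length_eq

theorem pvNodup_empty {α : Type} (l : List α)
    (h : ∀ y, y ∈ l ↔ False) : l = [] := by
  exact List.eq_nil_iff_forall_not_mem.mpr (fun x hx => (h x).mp hx)

-- ===== VERDICT (by name: the statement is the Claim_ definition above) =====
theorem clean_biorhythm_spec : Claim_equal_clean_biorhythm := by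
  intro x _
  unfold Spec_clean_biorhythm clean_biorhythm clean_biorhythm_alt
  simp only [pvFoldl_eq_flatMap, List.nil_append]
  set ts := ((PySem.Str.split? x "|").getD []).map (fun t => PySem.Str.stripChars t " ") with hts
  set L := ts.flatMap pvTagF with hL
  have hnd : (PySem.Set.ofList L).Nodup := PySem.Set.nodup_ofList L
  have hmem : ∀ y, y ∈ PySem.Set.ofList L ↔ y ∈ L := fun y => PySem.Set.mem_ofList L y
  by_cases he : ts.any (fun t => t == "Pre Dawn" || t == "Morning") = true <;>
  by_cases ho : ts.any (fun t => t == "Evening" || t == "After Midnight") = true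
  · -- both: set has exactly two elements → emptied → ""
    have hlen : (PySem.Set.ofList L).length = 2 := by
      apply pvNodup_pair _ "Early Bird" "Night Owl" hnd (by decide)
      intro y
      rw [hmem]
      constructor
      · exact fun h => pvMem_sub ts y h
      · rintro (rfl | rfl)
        · exact (pvMem_EB ts).mpr he
        · exact (pvMem_NO ts).mpr ho
    simp [hlen, he, ho, PySem.Str.join]
  · have heq : PySem.Set.ofList L = ["Early Bird"] := by
      apply pvNodup_singleton _ _ hnd
      intro y
      rw [hmem]
      constructor
      · intro h
        rcases pvMem_sub ts y h with rfl | rfl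
        · rfl
        · exact absurd ((pvMem_NO ts).mp h) ho
      · rintro rfl; exact (pvMem_EB ts).mpr he
    rw [heq]
    simp [he, ho]
    decide
  · have heq : PySem.Set.ofList L = ["Night Owl"] := by
      apply pvNodup_singleton _ _ hnd
      intro y
      rw [hmem]
      constructor
      · intro h
        rcases pvMem_sub ts y h with rfl | rfl
        · exact absurd ((pvMem_EB ts).mp h) he
        · rfl
      · rintro rfl; exact (pvMem_NO ts).mpr ho
    rw [heq]
    simp [he, ho]
    decide
  · have heq : PySem.Set.ofList L = [] := by
      apply pvNodup_empty
      intro y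
      rw [hmem]
      simp only [iff_false]
      intro h
      rcases pvMem_sub ts y h with rfl | rfl
      · exact he ((pvMem_EB ts).mp h)
      · exact ho ((pvMem_NO ts).mp h)
    rw [heq]
    simp [he, ho]
    decide
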